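-- pv_equiv track=rewrite | github.com/CandeMartt/testayde2021 | AYEDI/Unidad 4/archivo34.py | comparador_de_palabras
-- ===== SOURCE A (Python) =====
-- def comparador_de_palabras(palabra_1,palabra_2):
--     contador_1=0
--     contador_2=0
--     for i in palabra_1:
--         if i!=" ":
--             contador_1+=1
--         else:
--             contador_1=-1 #si hay espacios es porque es una frase
--             break
--     for i in palabra_2:
--         if i!=" ":
--             contador_2+=1 #es una palabra y la acumula
--         else:
--             contador_2=-1
--             break
--     if contador_1==-1 or contador_2==-1: #aca se demuestra si es una frase y le avisa al usuario
--         return "Se ha ingresado una frase"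
--     elif contador_1>contador_2:
--         return "La palabra 1 tiene más letras"
--     elif contador_1 == contador_2:
--         return "La palabra tiene la misma cantidad de letras"
--     else:
--         return "La palabra 2 tiene más letras"
-- ===== SOURCE B (Python) =====
-- def comparador_de_palabras(palabra_1, palabra_2):
--     # Lockstep walk over both words at once: a space in the common part ends
--     # immediately as a phrase; afterwards at most one word has a leftover tail,
--     # which decides phrase / longer word; empty leftover means equal lengths.
--     i, n = 0, min(len(palabra_1), len(palabra_2))
--     while i < n:
--         if palabra_1[i] == " " or palabra_2[i] == " ":
--             return "Se ha ingresado una frase"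
--         i += 1
--     rest = palabra_1[i:] + palabra_2[i:]
--     if " " in rest:
--         return "Se ha ingresado una frase"
--     if not rest:
--         return "La palabra tiene la misma cantidad de letras"
--     return "La palabra 1 tiene más letras" if i < len(palabra_1) else "La palabra 2 tiene más letras"
-- ===== Notes on version B (the rewrite author's own statement) =====
-- stated objective: alternative
-- what changed: Instead of counting the letters of each word separately and then comparing two counters, B walks both words in lockstep a single time (no counters, no length comparison of the scanned part): a space in the common prefix ends as a phrase at once, and after the lockstep only the leftover tail of the longer word is inspected (space -> phrase, empty -> equal, otherwise that word is longer).
import Mathlib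
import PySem

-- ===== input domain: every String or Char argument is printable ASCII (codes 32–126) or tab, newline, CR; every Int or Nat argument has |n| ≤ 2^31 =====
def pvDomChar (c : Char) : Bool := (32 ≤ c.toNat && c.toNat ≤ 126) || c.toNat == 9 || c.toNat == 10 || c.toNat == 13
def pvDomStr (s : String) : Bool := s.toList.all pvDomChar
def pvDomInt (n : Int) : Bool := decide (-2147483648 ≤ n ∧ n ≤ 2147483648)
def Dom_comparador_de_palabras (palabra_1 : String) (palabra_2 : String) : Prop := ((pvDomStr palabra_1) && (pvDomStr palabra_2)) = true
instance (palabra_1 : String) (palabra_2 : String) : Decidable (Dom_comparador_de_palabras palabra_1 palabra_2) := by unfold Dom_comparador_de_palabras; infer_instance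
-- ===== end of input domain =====

-- B walks both words in lockstep once instead of counting each word and comparing counters (alternative decomposition, same cost).

-- ===== PORT A =====
-- the counting loop with early break on a space, carried accumulator = contador
def pvCountA : List Char → Int → Int
  | [], c => c
  | i :: rest, c => if i ≠ ' ' then pvCountA rest (c + 1) else -1

def comparador_de_palabras (palabra_1 : String) (palabra_2 : String) : String :=
  let contador_1 := pvCountA palabra_1.toList 0
  let contador_2 := pvCountA palabra_2.toList 0
  if contador_1 == -1 || contador_2 == -1 then "Se ha ingresado una frase"
  else if contador_1 > contador_2 then "La palabra 1 tiene más letras"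
  else if contador_1 == contador_2 then "La palabra tiene la misma cantidad de letras"
  else "La palabra 2 tiene más letras"

-- ===== PORT B =====
-- the while loop over index i (lockstep over both words) becomes recursion on both lists;
-- after it, rest = palabra_1[i:] + palabra_2[i:] and 'i < len(palabra_1)' = the first list is the nonempty one
def pvLock : List Char → List Char → String
  | a :: t1, b :: t2 =>
      if a = ' ' || b = ' ' then "Se ha ingresado una frase" else pvLock t1 t2
  | l1, l2 =>
      let rest := l1 ++ l2
      if ' ' ∈ rest then "Se ha ingresado una frase"
      else if rest = [] then "La palabra tiene la misma cantidad de letras"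
      else if l1 ≠ [] then "La palabra 1 tiene más letras"
      else "La palabra 2 tiene más letras"

def comparador_de_palabras_alt (palabra_1 : String) (palabra_2 : String) : String :=
  pvLock palabra_1.toList palabra_2.toList

-- ===== PRECONDITION & SPEC =====
def Spec_comparador_de_palabras (palabra_1 : String) (palabra_2 : String) (out : String) : Prop := out = comparador_de_palabras_alt palabra_1 palabra_2
instance (palabra_1 : String) (palabra_2 : String) (out : String) : Decidable (Spec_comparador_de_palabras palabra_1 palabra_2 out) := by unfold Spec_comparador_de_palabras; infer_instance

-- ===== CLAIM (what is proved, stated in full; the proofs are below) =====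
def Claim_equal_comparador_de_palabras : Prop := ∀ (palabra_1 : String) (palabra_2 : String), Dom_comparador_de_palabras palabra_1 palabra_2 → Spec_comparador_de_palabras palabra_1 palabra_2 (comparador_de_palabras palabra_1 palabra_2)

-- ===== LEMMAS AND PROOFS =====
-- canonical description of the answer, in terms of space membership and lengths
def pvCanon (l1 l2 : List Char) : String :=
  if ' ' ∈ l1 ∨ ' ' ∈ l2 then "Se ha ingresado una frase"
  else if l2.length < l1.length then "La palabra 1 tiene más letras"
  else if l1.length = l2.length then "La palabra tiene la misma cantidad de letras"
  else "La palabra 2 tiene más letras"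

theorem pvCountA_eq (l : List Char) (c : Int) :
    pvCountA l c = if ' ' ∈ l then -1 else c + l.length := by
  induction l generalizing c with
  | nil => simp [pvCountA]
  | cons i rest ih =>
    by_cases h : i = ' '
    · simp [pvCountA, h]
    · have hstep : pvCountA (i :: rest) c = pvCountA rest (c + 1) := by
        simp [pvCountA, h]
      rw [hstep, ih]
      by_cases hr : ' ' ∈ rest
      · rw [if_pos hr, if_pos (List.mem_cons_of_mem i hr)]
      · have hc : ' ' ∉ i :: rest := by
          intro hmem
          rcases List.mem_cons.mp hmem with he | hm
          · exact h he.symm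
          · exact hr hm
        rw [if_neg hr, if_neg hc]
        simp [List.length_cons]
        ring

theorem pvA_eq_canon (l1 l2 : List Char) :
    (let c1 := pvCountA l1 0
     let c2 := pvCountA l2 0
     if c1 == -1 || c2 == -1 then "Se ha ingresado una frase"
     else if c1 > c2 then "La palabra 1 tiene más letras"
     else if c1 == c2 then "La palabra tiene la misma cantidad de letras"
     else "La palabra 2 tiene más letras") = pvCanon l1 l2 := by
  simp only [pvCountA_eq, pvCanon]
  by_cases h1 : ' ' ∈ l1 <;> by_cases h2 : ' ' ∈ l2
  · simp [h1, h2]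
  · simp [h1, h2]
  · simp [h1, h2]
  · rw [if_neg h1, if_neg h2, if_neg (not_or.mpr ⟨h1, h2⟩)]
    have e : ∀ n : Nat, (((0:Int) + (n:Int)) == -1) = false := by
      intro n; simp
    simp only [e, Bool.or_self, beq_iff_eq, gt_iff_lt]
    rw [if_neg (by simp)]
    split_ifs <;> first | rfl | (exfalso; omega)

theorem pvLock_eq_canon (l1 l2 : List Char) : pvLock l1 l2 = pvCanon l1 l2 := by
  induction l1 generalizing l2 with
  | nil =>
    cases l2 with
    | nil => simp [pvLock, pvCanon]
    | cons b t2 =>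
      simp only [pvLock, pvCanon]
      by_cases h : ' ' ∈ b :: t2
      · simp [h]
      · simp [h]
  | cons a t1 ih =>
    cases l2 with
    | nil =>
      simp only [pvLock, pvCanon]
      by_cases h : ' ' ∈ a :: t1
      · simp [h]
      · simp [h]
    | cons b t2 =>
      by_cases ha : a = ' '
      · simp [pvLock, pvCanon, ha]
      · by_cases hb : b = ' '
        · simp [pvLock, pvCanon, hb]
        · have hstep : pvLock (a :: t1) (b :: t2) = pvLock t1 t2 := by
            simp [pvLock, ha, hb]
          rw [hstep, ih]
          have h1 : (' ' ∈ a :: t1 ∨ ' ' ∈ b :: t2) ↔ (' ' ∈ t1 ∨ ' ' ∈ t2) := by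
            simp only [List.mem_cons]
            constructor
            · rintro ((h | h) | (h | h))
              · exact absurd h.symm ha
              · exact Or.inl h
              · exact absurd h.symm hb
              · exact Or.inr h
            · rintro (h | h)
              · exact Or.inl (Or.inr h)
              · exact Or.inr (Or.inr h)
          simp only [pvCanon, List.length_cons]
          by_cases hm : ' ' ∈ t1 ∨ ' ' ∈ t2
          · rw [if_pos hm, if_pos (h1.mpr hm)]
          · rw [if_neg hm, if_neg (h1.not.mpr hm)]
            split_ifs <;> first | rfl | (exfalso; omega)

-- ===== VERDICT (by name: the statement is the Claim_ definition above) =====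
theorem comparador_de_palabras_spec : Claim_equal_comparador_de_palabras := by
  intro p1 p2 _
  unfold Spec_comparador_de_palabras comparador_de_palabras comparador_de_palabras_alt
  rw [pvLock_eq_canon]
  exact pvA_eq_canon p1.toList p2.toList
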